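-- pv_equiv track=rewrite | github.com/Ryukoku-Horizon/2024-BasicGroup-SpringApp-Y230253 | cashig_app/main.py | select_payment
-- ===== SOURCE A (Python) =====
-- def select_payment(order_sum: int, available: dict) -> int:
--     """
--     available: {コイン額面: 個数, ...}
--     order_sum 以上の支払額で、可能な組み合わせの中から最小額を返す。
--     DP により、利用可能な金額の組み合わせを評価する。
--     """
--     total_available = sum(denom * count for denom, count in available.items())
--     max_sum = total_available
--     dp = [False] * (max_sum + 1)
--     dp[0] = True
--
--     # 各額面ごとに個数分ループ
--     for denom in sorted(available.keys(), reverse=True):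
--         quantity = available[denom]
--         for _ in range(quantity):
--             for s in range(max_sum, denom - 1, -1):
--                 if dp[s - denom]:
--                     dp[s] = True
--
--     for s in range(order_sum, max_sum + 1):
--         if dp[s]:
--             return s
--     return order_sum
-- ===== SOURCE B (Python) =====
-- def select_payment(order_sum: int, available: dict) -> int:
--     """Reachable-sums set: each denomination is processed once, adding all
--     its multiples at a time; answer is the smallest reachable sum >= order_sum,
--     or order_sum itself if none exists."""
--     sums = {0}
--     for denom, count in available.items():
--         sums = {s + denom * k for s in sums for k in range(count + 1)}
--     candidates = [s for s in sums if s >= order_sum]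
--     return min(candidates) if candidates else order_sum
-- ===== Notes on version B (the rewrite author's own statement) =====
-- stated objective: alternative
-- what changed: Replaces the boolean dp-array with one backward in-place sweep per individual coin by a set of reachable sums that processes each denomination exactly once, adding all its multiples in a single comprehension, and takes min of the candidates instead of a linear first-true scan.
-- outside the precondition, e.g. on select_payment(-1, {1: 1}): A returns -1, B returns 0; on select_payment(5, {2: -1, 6: 3}): A returns 6, B returns 5
import Mathlib
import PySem

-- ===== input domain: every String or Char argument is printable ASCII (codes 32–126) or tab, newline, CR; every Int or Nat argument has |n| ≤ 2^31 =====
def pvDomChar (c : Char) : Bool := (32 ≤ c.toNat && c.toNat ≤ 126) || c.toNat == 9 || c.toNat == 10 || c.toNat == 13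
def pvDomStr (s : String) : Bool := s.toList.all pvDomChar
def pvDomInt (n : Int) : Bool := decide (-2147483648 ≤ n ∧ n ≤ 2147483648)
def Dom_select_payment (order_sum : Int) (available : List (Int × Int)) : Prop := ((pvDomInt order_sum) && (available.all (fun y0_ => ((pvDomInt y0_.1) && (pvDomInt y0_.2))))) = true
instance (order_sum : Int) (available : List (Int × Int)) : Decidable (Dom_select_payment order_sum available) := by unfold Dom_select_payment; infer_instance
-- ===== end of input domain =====

-- B replaces A's per-coin backward boolean-array DP by a reachable-sums set that
-- consumes each denomination once (all its multiples at a time) and takes a min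
-- over the candidates; objective: alternative algorithm, equal result on Pre_.

-- ===== PORT A =====
-- Python's `dp` is a mutable array; these two helpers are dp[i] / dp[i] = v with O(1)
-- access, exact for the nonnegative in-range indices that are the only ones A's loops
-- reach on inputs admitted by Pre_ (proved equal to PySem.List.pyGetD/pySetD there).
def pyArrGetD (a : Array Bool) (i : Int) (d : Bool) : Bool :=
  if h : 0 ≤ i ∧ i.toNat < a.size then a[i.toNat]'h.2 else d

def pyArrSetD (a : Array Bool) (i : Int) (v : Bool) : Array Bool :=
  if h : 0 ≤ i ∧ i.toNat < a.size then a.set i.toNat v h.2 else a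

def select_payment (order_sum : Int) (available : List (Int × Int)) : Int :=
  -- the dict parameter, decoded exactly as Python builds a dict from pairs (later duplicates overwrite)
  let d : PySem.Dict Int Int := PySem.Dict.ofList available
  let total_available : Int := (d.items.map (fun p => p.1 * p.2)).sum
  let max_sum : Int := total_available
  let dp : Array Bool := Array.replicate (max_sum + 1).toNat false
  let dp : Array Bool := pyArrSetD dp 0 true
  let dp : Array Bool :=
    (PySem.List.sorted d.keys (fun x => x) true).foldl (fun dp denom =>
      let quantity : Int := d.getD denom 0
      (PySem.List.pyRange 0 quantity).foldl (fun dp _ =>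
        (PySem.List.pyRange max_sum (denom - 1) (-1)).foldl (fun dp s =>
          if pyArrGetD dp (s - denom) false then pyArrSetD dp s true else dp)
          dp) dp) dp
  match (PySem.List.pyRange order_sum (max_sum + 1)).find? (fun s => pyArrGetD dp s false) with
  | some s => s
  | none => order_sum

-- ===== PORT B =====
def select_payment_alt (order_sum : Int) (available : List (Int × Int)) : Int :=
  let d : PySem.Dict Int Int := PySem.Dict.ofList available
  let sums : PySem.Set Int :=
    d.items.foldl (fun sums p =>
      PySem.Set.ofList (sums.flatMap (fun s =>
        (PySem.List.pyRange 0 (p.2 + 1)).map (fun k => s + p.1 * k))))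
      (PySem.Set.ofList [0])
  let candidates : List Int := sums.filter (fun s => order_sum ≤ s)
  match PySem.List.min? candidates (fun s => s) with
  | some m => m
  | none => order_sum

-- ===== PRECONDITION & SPEC =====
-- Pre_ restricts to the cashier's natural domain (nonnegative amount to pay, nonnegative
-- coin counts, and no negative denomination actually in stock): outside it A raises
-- IndexError (negative total, or a negative denomination with a positive count reads past
-- the dp array) or reads dp through Python's negative-index wraparound (negative
-- order_sum), where its value is accidental.
def Pre_select_payment (order_sum : Int) (available : List (Int × Int)) : Prop :=
  0 ≤ order_sum ∧ ∀ p ∈ available, 0 ≤ p.2 ∧ (0 ≤ p.1 ∨ p.2 = 0)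
instance (order_sum : Int) (available : List (Int × Int)) : Decidable (Pre_select_payment order_sum available) := by unfold Pre_select_payment; infer_instance

def pvWitness_select_payment : Int × (List (Int × Int)) := (5, [(3, 2), (1, 1), (5, 1)])

def Spec_select_payment (order_sum : Int) (available : List (Int × Int)) (out : Int) : Prop := out = select_payment_alt order_sum available
instance (order_sum : Int) (available : List (Int × Int)) (out : Int) : Decidable (Spec_select_payment order_sum available out) := by unfold Spec_select_payment; infer_instance

-- ===== CLAIM (what is proved, stated in full; the proofs are below) =====
def Claim_equal_select_payment : Prop := ∀ (order_sum : Int) (available : List (Int × Int)), Dom_select_payment order_sum available → Pre_select_payment order_sum available → Spec_select_payment order_sum available (select_payment order_sum available)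

-- ===== LEMMAS AND PROOFS =====

def ReachP : List (Int × Int) → Int → Prop
  | [], s => s = 0
  | p :: t, s => ∃ k : Int, 0 ≤ k ∧ k ≤ p.2 ∧ ReachP t (s - p.1 * k)

lemma reachP_bounds {L : List (Int × Int)} (hL : ∀ p ∈ L, 0 ≤ p.2 ∧ (0 ≤ p.1 ∨ p.2 = 0)) :
    ∀ {s : Int}, ReachP L s → 0 ≤ s ∧ s ≤ (L.map (fun p => p.1 * p.2)).sum := by
  induction L with
  | nil => intro s hs; simp [ReachP] at hs; simp [hs]
  | cons p t ih =>
    intro s hs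
    obtain ⟨k, hk0, hkc, hr⟩ := hs
    have hp := hL p List.mem_cons_self
    have ht := ih (fun q hq => hL q (List.mem_cons_of_mem _ hq)) hr
    have h12 : 0 ≤ p.1 * k ∧ p.1 * k ≤ p.1 * p.2 := by
      rcases hp.2 with h | h
      · exact ⟨mul_nonneg h hk0, mul_le_mul_of_nonneg_left hkc h⟩
      · have hk : k = 0 := by omega
        rw [hk, h]
        simp
    constructor
    · omega
    · simp only [List.map_cons, List.sum_cons]; omega

lemma reachP_perm {L L' : List (Int × Int)} (h : L.Perm L') : ∀ s, ReachP L s ↔ ReachP L' s := by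
  induction h with
  | nil => intro s; rfl
  | cons x _ ih => intro s; simp only [ReachP]; exact exists_congr fun k => and_congr_right fun _ => and_congr_right fun _ => ih _
  | swap x y t =>
    intro s
    simp only [ReachP]
    constructor
    · rintro ⟨k1, h10, h1c, k2, h20, h2c, hr⟩
      refine ⟨k2, h20, h2c, k1, h10, h1c, ?_⟩
      have e : s - x.1 * k2 - y.1 * k1 = s - y.1 * k1 - x.1 * k2 := by ring
      rw [e]; exact hr
    · rintro ⟨k1, h10, h1c, k2, h20, h2c, hr⟩
      refine ⟨k2, h20, h2c, k1, h10, h1c, ?_⟩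
      have e : s - y.1 * k2 - x.1 * k1 = s - x.1 * k1 - y.1 * k2 := by ring
      rw [e]; exact hr
  | trans _ _ ih1 ih2 => intro s; exact (ih1 s).trans (ih2 s)

lemma b_fold_mem (L : List (Int × Int)) :
    ∀ (S : List Int) (x : Int),
      x ∈ L.foldl (fun sums p =>
        PySem.Set.ofList (sums.flatMap (fun s =>
          (PySem.List.pyRange 0 (p.2 + 1)).map (fun k => s + p.1 * k)))) S ↔
      ∃ t ∈ S, ReachP L (x - t) := by
  induction L with
  | nil =>
    intro S x
    simp only [List.foldl_nil, ReachP]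
    constructor
    · intro hx; exact ⟨x, hx, by ring⟩
    · rintro ⟨t, ht, h⟩
      have : x = t := by omega
      rwa [this]
  | cons p t ih =>
    intro S x
    simp only [List.foldl_cons]
    rw [ih _ x]
    constructor
    · rintro ⟨u, hu, hr⟩
      rw [PySem.Set.mem_ofList] at hu
      simp only [List.mem_flatMap, List.mem_map] at hu
      obtain ⟨s, hs, k, hk, rfl⟩ := hu
      rw [PySem.List.mem_pyRange_one] at hk
      refine ⟨s, hs, k, hk.1, by omega, ?_⟩
      have e : x - s - p.1 * k = x - (s + p.1 * k) := by ring
      rw [e]; exact hr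
    · rintro ⟨s, hs, k, hk0, hkc, hr⟩
      refine ⟨s + p.1 * k, ?_, ?_⟩
      swap
      · have e : x - (s + p.1 * k) = x - s - p.1 * k := by ring
        rw [e]; exact hr
      rw [PySem.Set.mem_ofList]
      simp only [List.mem_flatMap, List.mem_map]
      exact ⟨s, hs, k, by rw [PySem.List.mem_pyRange_one]; omega, rfl⟩

lemma getD_set_ne (l : List Bool) (i j : Nat) (v : Bool) (h : j ≠ i) :
    (l.set i v).getD j false = l.getD j false := by
  simp only [List.getD]
  rw [List.getElem?_set_ne (by omega)]

lemma getD_set_self (l : List Bool) (i : Nat) (h : i < l.length) :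
    (l.set i true).getD i false = true := by
  simp [List.getD, h]

lemma pass_length (d a : Int) (dp : List Bool) :
    ((PySem.List.pyRange a (d - 1) (-1)).foldl (fun dp s =>
        if PySem.List.pyGetD dp (s - d) false then PySem.List.pySetD dp s true else dp) dp).length = dp.length := by
  generalize PySem.List.pyRange a (d - 1) (-1) = l
  induction l generalizing dp with
  | nil => rfl
  | cons x t ih =>
    simp only [List.foldl_cons]
    rw [ih]
    split <;> simp [PySem.List.length_pySetD]

lemma pass_getD (d : Int) (hd : 0 ≤ d) :
    ∀ (n : Nat) (a : Int), (a - d + 1).toNat = n → ∀ (dp : List Bool), a < (dp.length : Int) →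
      ∀ i : Nat, (i : Int) < (dp.length : Int) →
        ((PySem.List.pyRange a (d - 1) (-1)).foldl (fun dp s =>
            if PySem.List.pyGetD dp (s - d) false then PySem.List.pySetD dp s true else dp) dp).getD i false =
          if d ≤ (i : Int) ∧ (i : Int) ≤ a then dp.getD i false || dp.getD ((i : Int) - d).toNat false
          else dp.getD i false := by
  intro n
  induction n with
  | zero =>
    intro a ha dp _ i _
    have hle : a ≤ d - 1 := by omega
    rw [PySem.List.pyRange_neg_one_eq_nil hle, List.foldl_nil, if_neg (by omega)]
  | succ m ih =>
    intro a ha dp hlen i hi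
    have hlt : d - 1 < a := by omega
    rw [PySem.List.pyRange_neg_one_cons hlt, List.foldl_cons]
    have had : (0:Int) ≤ a - d := by omega
    have ha0 : (0:Int) ≤ a := by omega
    have hadlt : (a - d).toNat < dp.length := by omega
    have hanat : a.toNat < dp.length := by omega
    -- the first step
    set dp1 := (if PySem.List.pyGetD dp (a - d) false then PySem.List.pySetD dp a true else dp) with hdp1
    have hlen1 : dp1.length = dp.length := by
      rw [hdp1]; split <;> simp [PySem.List.length_pySetD]
    have hrd : PySem.List.pyGetD dp (a - d) false = dp.getD (a - d).toNat false := by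
      rw [PySem.List.pyGetD_of_nonneg _ _ had]
    have hget1 : ∀ j : Nat, j ≠ a.toNat → dp1.getD j false = dp.getD j false := by
      intro j hj
      rw [hdp1]
      split
      · rw [PySem.List.pySetD_of_nonneg _ _ ha0, getD_set_ne _ _ _ _ hj]
      · rfl
    have hget1a : dp1.getD a.toNat false = (dp.getD a.toNat false || dp.getD (a - d).toNat false) := by
      rw [hdp1, hrd]
      by_cases hc : dp.getD (a - d).toNat false = true
      · rw [if_pos hc, PySem.List.pySetD_of_nonneg _ _ ha0, getD_set_self _ _ hanat, hc, Bool.or_true]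
      · rw [if_neg hc]
        simp only [Bool.not_eq_true] at hc
        rw [hc, Bool.or_false]
    rw [ih (a - 1) (by omega) dp1 (by omega) i (by omega)]
    by_cases h1 : d ≤ (i : Int) ∧ (i : Int) ≤ a - 1
    · rw [if_pos h1, if_pos (by omega)]
      rw [hget1 i (by omega), hget1 ((i : Int) - d).toNat (by omega)]
    · rw [if_neg h1]
      by_cases h2 : (i : Int) = a
      · have hia : i = a.toNat := by omega
        rw [hia, hget1a, if_pos (by omega)]
        congr 2
        omega
      · rw [if_neg (by omega), hget1 i (by omega)]

def TrueAt (dp : List Bool) (i : Int) : Prop :=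
  0 ≤ i ∧ i.toNat < dp.length ∧ dp.getD i.toNat false = true

lemma pass_trueAt (d : Int) (hd : 0 ≤ d) (max_sum : Int) (hms : 0 ≤ max_sum)
    (dp : List Bool) (hlen : dp.length = (max_sum + 1).toNat) (i : Int) (hi : i ≤ max_sum) :
    TrueAt ((PySem.List.pyRange max_sum (d - 1) (-1)).foldl (fun dp s =>
        if PySem.List.pyGetD dp (s - d) false then PySem.List.pySetD dp s true else dp) dp) i ↔
      (TrueAt dp i ∨ (d ≤ i ∧ TrueAt dp (i - d))) := by
  have hlen' : ((PySem.List.pyRange max_sum (d - 1) (-1)).foldl (fun dp s =>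
      if PySem.List.pyGetD dp (s - d) false then PySem.List.pySetD dp s true else dp) dp).length = dp.length :=
    pass_length d max_sum dp
  by_cases h0 : 0 ≤ i
  · have hnat : (i.toNat : Int) = i := Int.toNat_of_nonneg h0
    have hin : i.toNat < dp.length := by omega
    have hg := pass_getD d hd (max_sum - d + 1).toNat max_sum rfl dp (by omega) i.toNat (by omega)
    rw [hnat] at hg
    constructor
    · rintro ⟨-, -, hT⟩
      rw [hg] at hT
      by_cases hc : d ≤ i ∧ i ≤ max_sum
      · rw [if_pos hc] at hT
        rcases Bool.or_eq_true_iff.mp hT with h | h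
        · exact Or.inl ⟨h0, hin, h⟩
        · exact Or.inr ⟨hc.1, by omega, by omega, h⟩
      · rw [if_neg hc] at hT
        exact Or.inl ⟨h0, hin, hT⟩
    · intro hcase
      refine ⟨h0, by omega, ?_⟩
      rw [hg]
      rcases hcase with ⟨-, -, hT⟩ | ⟨hdi, -, -, hT⟩
      · by_cases hc : d ≤ i ∧ i ≤ max_sum
        · rw [if_pos hc, hT, Bool.true_or]
        · rw [if_neg hc]; exact hT
      · rw [if_pos ⟨hdi, hi⟩, hT, Bool.or_true]
  · constructor
    · rintro ⟨h, -⟩; omega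
    · rintro (⟨h, -⟩ | ⟨hdi, h, -⟩) <;> omega

lemma multipass_trueAt_nat (d : Int) (hd : 0 ≤ d) (max_sum : Int) (hms : 0 ≤ max_sum) :
    ∀ (m : Nat) (dp : List Bool), dp.length = (max_sum + 1).toNat →
      ∀ i : Int, i ≤ max_sum →
        (TrueAt ((PySem.List.pyRange 0 (m : Int)).foldl (fun dp _ =>
            (PySem.List.pyRange max_sum (d - 1) (-1)).foldl (fun dp s =>
              if PySem.List.pyGetD dp (s - d) false then PySem.List.pySetD dp s true else dp) dp) dp) i ↔
          ∃ k : Int, 0 ≤ k ∧ k ≤ (m : Int) ∧ TrueAt dp (i - d * k)) := by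
  intro m
  induction m with
  | zero =>
    intro dp hlen i hi
    rw [show ((0:Nat):Int) = 0 by rfl, PySem.List.pyRange_one_eq_nil (le_refl 0), List.foldl_nil]
    constructor
    · intro h; exact ⟨0, le_refl 0, le_refl 0, by rwa [mul_zero, sub_zero]⟩
    · rintro ⟨k, hk0, hk1, h⟩
      have : k = 0 := by omega
      rwa [this, mul_zero, sub_zero] at h
  | succ m ih =>
    intro dp hlen i hi
    have hcast : ((m + 1 : Nat) : Int) = (m : Int) + 1 := by push_cast; ring
    rw [hcast, PySem.List.pyRange_one_succ_right (by positivity), List.foldl_append, List.foldl_cons, List.foldl_nil]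
    have hlenm : ((PySem.List.pyRange 0 (m : Int)).foldl (fun dp _ =>
        (PySem.List.pyRange max_sum (d - 1) (-1)).foldl (fun dp s =>
          if PySem.List.pyGetD dp (s - d) false then PySem.List.pySetD dp s true else dp) dp) dp).length = dp.length := by
      generalize PySem.List.pyRange 0 (m : Int) = l
      induction l generalizing dp with
      | nil => rfl
      | cons x t ih2 => simp only [List.foldl_cons]; rw [ih2 _ (by rw [pass_length]; exact hlen)]
                        rw [pass_length]
    rw [pass_trueAt d hd max_sum hms _ (by rw [hlenm]; exact hlen) i hi,
        ih dp hlen i hi]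
    constructor
    · rintro (⟨k, hk0, hkm, hT⟩ | ⟨hdi, hT⟩)
      · exact ⟨k, hk0, by omega, hT⟩
      · rw [ih dp hlen (i - d) (by omega)] at hT
        obtain ⟨k, hk0, hkm, hT⟩ := hT
        refine ⟨k + 1, by omega, by omega, ?_⟩
        have e : i - d * (k + 1) = i - d - d * k := by ring
        rwa [e]
    · rintro ⟨k, hk0, hkm, hT⟩
      by_cases hk : k ≤ (m : Int)
      · exact Or.inl ⟨k, hk0, hk, hT⟩
      · have hk1 : k = (m : Int) + 1 := by omega
        have h0k : 0 ≤ i - d * k := hT.1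
        have hdk : d ≤ d * k := by nlinarith
        refine Or.inr ⟨by omega, ?_⟩
        rw [ih dp hlen (i - d) (by omega)]
        refine ⟨k - 1, by omega, by omega, ?_⟩
        have e : i - d - d * (k - 1) = i - d * k := by ring
        rwa [e]

lemma multipass_trueAt (d : Int) (hd : 0 ≤ d) (max_sum : Int) (hms : 0 ≤ max_sum)
    (q : Int) (hq : 0 ≤ q) (dp : List Bool) (hlen : dp.length = (max_sum + 1).toNat)
    (i : Int) (hi : i ≤ max_sum) :
    TrueAt ((PySem.List.pyRange 0 q).foldl (fun dp _ =>
        (PySem.List.pyRange max_sum (d - 1) (-1)).foldl (fun dp s =>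
          if PySem.List.pyGetD dp (s - d) false then PySem.List.pySetD dp s true else dp) dp) dp) i ↔
      ∃ k : Int, 0 ≤ k ∧ k ≤ q ∧ TrueAt dp (i - d * k) := by
  have hq' : ((q.toNat : Nat) : Int) = q := Int.toNat_of_nonneg hq
  rw [← hq']
  exact multipass_trueAt_nat d hd max_sum hms q.toNat dp hlen i hi

lemma a_fold_length (max_sum : Int) (L : List (Int × Int)) :
    ∀ (dp : List Bool),
      (L.foldl (fun dp p =>
          (PySem.List.pyRange 0 p.2).foldl (fun dp _ =>
            (PySem.List.pyRange max_sum (p.1 - 1) (-1)).foldl (fun dp s =>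
              if PySem.List.pyGetD dp (s - p.1) false then PySem.List.pySetD dp s true else dp) dp) dp) dp).length
        = dp.length := by
  induction L with
  | nil => intro dp; rfl
  | cons p t ih =>
    intro dp
    simp only [List.foldl_cons]
    rw [ih]
    generalize PySem.List.pyRange 0 p.2 = l
    induction l generalizing dp with
    | nil => rfl
    | cons x t2 ih2 => simp only [List.foldl_cons]; rw [ih2 _]; rw [pass_length]

lemma a_fold_trueAt (max_sum : Int) (hms : 0 ≤ max_sum) (L : List (Int × Int))
    (hL : ∀ p ∈ L, 0 ≤ p.2 ∧ (0 ≤ p.1 ∨ p.2 = 0)) :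
    ∀ (dp : List Bool), dp.length = (max_sum + 1).toNat →
      ∀ i : Int, i ≤ max_sum →
        (TrueAt (L.foldl (fun dp p =>
            (PySem.List.pyRange 0 p.2).foldl (fun dp _ =>
              (PySem.List.pyRange max_sum (p.1 - 1) (-1)).foldl (fun dp s =>
                if PySem.List.pyGetD dp (s - p.1) false then PySem.List.pySetD dp s true else dp) dp) dp) dp) i ↔
          ∃ t : Int, TrueAt dp t ∧ ReachP L (i - t)) := by
  induction L with
  | nil =>
    intro dp hlen i hi
    simp only [List.foldl_nil, ReachP]
    constructor
    · intro h; exact ⟨i, h, by ring⟩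
    · rintro ⟨t, ht, he⟩
      have : t = i := by omega
      rwa [this] at ht
  | cons p t ih =>
    intro dp hlen i hi
    have hp := hL p List.mem_cons_self
    have hLt : ∀ q ∈ t, 0 ≤ q.2 ∧ (0 ≤ q.1 ∨ q.2 = 0) := fun q hq => hL q (List.mem_cons_of_mem _ hq)
    rcases hp.2 with hp1 | hp2
    swap
    · -- this entry has count 0: the quantity loop body is skipped and the entry adds nothing
      simp only [List.foldl_cons, hp2, PySem.List.pyRange_one_eq_nil (le_refl 0), List.foldl_nil]
      rw [ih hLt dp hlen i hi]
      constructor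
      · rintro ⟨u, hu, hr⟩
        refine ⟨u, hu, 0, le_refl 0, by omega, ?_⟩
        rwa [mul_zero, sub_zero]
      · rintro ⟨u, hu, k, hk0, hkc, hr⟩
        have hk : k = 0 := by omega
        rw [hk, mul_zero, sub_zero] at hr
        exact ⟨u, hu, hr⟩
    simp only [List.foldl_cons]
    have hlen2 : ((PySem.List.pyRange 0 p.2).foldl (fun dp _ =>
        (PySem.List.pyRange max_sum (p.1 - 1) (-1)).foldl (fun dp s =>
          if PySem.List.pyGetD dp (s - p.1) false then PySem.List.pySetD dp s true else dp) dp) dp).length = (max_sum + 1).toNat := by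
      generalize PySem.List.pyRange 0 p.2 = l
      induction l generalizing dp with
      | nil => exact hlen
      | cons x t2 ih2 => simp only [List.foldl_cons]; exact ih2 _ (by rw [pass_length]; exact hlen)
    rw [ih hLt _ hlen2 i hi]
    constructor
    · rintro ⟨u, hu, hr⟩
      rw [multipass_trueAt p.1 hp1 max_sum hms p.2 hp.1 dp hlen u (by
        have := hu.1
        have hub : u.toNat < ((PySem.List.pyRange 0 p.2).foldl (fun dp _ =>
          (PySem.List.pyRange max_sum (p.1 - 1) (-1)).foldl (fun dp s =>
            if PySem.List.pyGetD dp (s - p.1) false then PySem.List.pySetD dp s true else dp) dp) dp).length := hu.2.1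
        rw [hlen2] at hub
        omega)] at hu
      obtain ⟨k, hk0, hkc, hT⟩ := hu
      refine ⟨u - p.1 * k, hT, k, hk0, hkc, ?_⟩
      have e : i - (u - p.1 * k) - p.1 * k = i - u := by ring
      rwa [e]
    · rintro ⟨v, hv, k, hk0, hkc, hr⟩
      have hbnd := reachP_bounds hLt hr
      have hv0 := hv.1
      have hd0 : 0 ≤ p.1 * k := mul_nonneg hp1 hk0
      refine ⟨v + p.1 * k, ?_, ?_⟩
      · rw [multipass_trueAt p.1 hp1 max_sum hms p.2 hp.1 dp hlen (v + p.1 * k) (by omega)]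
        refine ⟨k, hk0, hkc, ?_⟩
        have e : v + p.1 * k - p.1 * k = v := by ring
        rwa [e]
      · have e : i - (v + p.1 * k) = i - v - p.1 * k := by ring
        rwa [e]

lemma trueAt_dp0 (n : Nat) (hn : 0 < n) (t : Int) :
    TrueAt (PySem.List.pySetD (List.replicate n false) 0 true) t ↔ t = 0 := by
  rw [PySem.List.pySetD_of_nonneg _ _ (le_refl 0)]
  simp only [Int.toNat_zero]
  constructor
  · rintro ⟨h0, hlt, hT⟩
    by_contra hne
    have htn : t.toNat ≠ 0 := by omega
    rw [getD_set_ne _ _ _ _ htn] at hT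
    rw [List.getD_eq_getElem?_getD] at hT
    rw [List.getElem?_replicate] at hT
    simp only [List.length_set, List.length_replicate] at hlt
    rw [if_pos hlt] at hT
    simp at hT
  · rintro rfl
    refine ⟨le_refl 0, ?_, ?_⟩
    · simpa using hn
    · rw [Int.toNat_zero, getD_set_self]
      simpa using hn

lemma find?_pyRange_some {p : Int → Bool} :
    ∀ (n : Nat) (a b : Int), (b - a).toNat = n → ∀ {s : Int},
      (PySem.List.pyRange a b).find? p = some s →
      p s = true ∧ a ≤ s ∧ s < b ∧ ∀ x, a ≤ x → x < s → p x = false := by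
  intro n
  induction n with
  | zero =>
    intro a b hn s h
    rw [PySem.List.pyRange_one_eq_nil (by omega)] at h
    simp at h
  | succ m ih =>
    intro a b hn s h
    rw [PySem.List.pyRange_one_cons (by omega)] at h
    by_cases hpa : p a = true
    · rw [List.find?_cons_of_pos (p := p) (l := PySem.List.pyRange (a+1) b) hpa] at h
      obtain rfl : a = s := by injection h
      exact ⟨hpa, le_refl _, by omega, fun x h1 h2 => absurd (h1.trans_lt h2) (lt_irrefl _)⟩
    · rw [List.find?_cons_of_neg (p := p) (l := PySem.List.pyRange (a+1) b) (by simpa using hpa)] at h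
      obtain ⟨hp, h1, h2, hall⟩ := ih (a + 1) b (by omega) h
      refine ⟨hp, by omega, h2, fun x hx1 hx2 => ?_⟩
      by_cases hxa : x = a
      · rw [hxa]; simpa using hpa
      · exact hall x (by omega) hx2

lemma find?_pyRange_none {p : Int → Bool} :
    ∀ (n : Nat) (a b : Int), (b - a).toNat = n →
      (PySem.List.pyRange a b).find? p = none →
      ∀ x, a ≤ x → x < b → p x = false := by
  intro n a b hn h x h1 h2
  rw [List.find?_eq_none] at h
  have := h x (by rw [PySem.List.mem_pyRange_one]; omega)
  simpa using this

lemma mem_items_ofList {l : List (Int × Int)} {p : Int × Int} :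
    p ∈ (PySem.Dict.ofList l).items → p ∈ l := by
  have key : ∀ (l : List (Int × Int)) (d : PySem.Dict Int Int),
      ∀ q ∈ (l.foldl (fun acc p => acc.insert p.1 p.2) d).items, q ∈ d.items ∨ q ∈ l := by
    intro l
    induction l with
    | nil => intro d q hq; exact Or.inl hq
    | cons x t ih =>
      intro d q hq
      simp only [List.foldl_cons] at hq
      rcases ih _ q hq with h | h
      · rw [PySem.Dict.mem_items_insert] at h
        rcases h with rfl | ⟨h, -⟩
        · exact Or.inr List.mem_cons_self
        · exact Or.inl h
      · exact Or.inr (List.mem_cons_of_mem _ h)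
  intro hp
  rcases key l PySem.Dict.empty p hp with h | h
  · simp [PySem.Dict.empty] at h
  · exact h

lemma pyArrGetD_toList (a : Array Bool) (i : Int) (d : Bool) (h : 0 ≤ i) :
    pyArrGetD a i d = PySem.List.pyGetD a.toList i d := by
  rw [PySem.List.pyGetD_of_nonneg _ _ h]
  unfold pyArrGetD
  by_cases hin : i.toNat < a.size
  · rw [dif_pos ⟨h, hin⟩, List.getD_eq_getElem?_getD,
      List.getElem?_eq_getElem (by simpa using hin)]
    simp
  · rw [dif_neg (fun hc => hin hc.2), List.getD_eq_getElem?_getD,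
      List.getElem?_eq_none (by simpa using hin)]
    rfl

lemma pyArrSetD_toList (a : Array Bool) (i : Int) (v : Bool) (h : 0 ≤ i) :
    (pyArrSetD a i v).toList = PySem.List.pySetD a.toList i v := by
  rw [PySem.List.pySetD_of_nonneg _ _ h]
  unfold pyArrSetD
  by_cases hin : i.toNat < a.size
  · rw [dif_pos ⟨h, hin⟩, Array.toList_set]
  · rw [dif_neg (fun hc => hin hc.2), List.set_eq_of_length_le (by simpa using hin)]

lemma foldl_toList {α : Type} (l : List α) (f : Array Bool → α → Array Bool)
    (g : List Bool → α → List Bool)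
    (h : ∀ x ∈ l, ∀ a : Array Bool, (f a x).toList = g a.toList x) :
    ∀ a : Array Bool, (l.foldl f a).toList = l.foldl g a.toList := by
  induction l with
  | nil => intro a; rfl
  | cons x t ih =>
    intro a
    simp only [List.foldl_cons]
    rw [ih (fun y hy => h y (List.mem_cons_of_mem _ hy)), h x List.mem_cons_self a]

lemma find?_congr' {p q : Int → Bool} (l : List Int) (h : ∀ x ∈ l, p x = q x) :
    l.find? p = l.find? q := by
  induction l with
  | nil => rfl
  | cons x t ih =>
    rw [List.find?_cons, List.find?_cons, h x List.mem_cons_self,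
      ih (fun y hy => h y (List.mem_cons_of_mem _ hy))]

theorem main_eq (order_sum : Int) (available : List (Int × Int))
    (h0 : 0 ≤ order_sum) (hav : ∀ p ∈ available, 0 ≤ p.2 ∧ (0 ≤ p.1 ∨ p.2 = 0)) :
    select_payment order_sum available = select_payment_alt order_sum available := by
  simp only [select_payment, select_payment_alt]
  set d : PySem.Dict Int Int := PySem.Dict.ofList available with hd
  set T : Int := (d.items.map (fun p => p.1 * p.2)).sum with hT
  have hitems : ∀ p ∈ d.items, 0 ≤ p.2 ∧ (0 ≤ p.1 ∨ p.2 = 0) :=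
    fun p hp => hav p (mem_items_ofList hp)
  have hT0 : 0 ≤ T := by
    rw [hT]
    apply List.sum_nonneg
    intro x hx
    obtain ⟨p, hp, rfl⟩ := List.mem_map.mp hx
    rcases (hitems p hp).2 with h | h
    · exact mul_nonneg h (hitems p hp).1
    · rw [h, mul_zero]
  set dp0 : List Bool := PySem.List.pySetD (List.replicate (T + 1).toNat false) 0 true with hdp0
  have hlen0 : dp0.length = (T + 1).toNat := by
    rw [hdp0, PySem.List.length_pySetD, List.length_replicate]
  set L_A : List (Int × Int) :=
    (PySem.List.sorted d.keys (fun x => x) true).map (fun k => (k, d.getD k 0)) with hLA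
  set dpF : List Bool :=
    (PySem.List.sorted d.keys (fun x => x) true).foldl (fun dp denom =>
      (PySem.List.pyRange 0 (d.getD denom 0)).foldl (fun dp _ =>
        (PySem.List.pyRange T (denom - 1) (-1)).foldl (fun dp s =>
          if PySem.List.pyGetD dp (s - denom) false then PySem.List.pySetD dp s true else dp)
          dp) dp) dp0 with hdpF
  set dpA : Array Bool :=
    (PySem.List.sorted d.keys (fun x => x) true).foldl (fun dp denom =>
      (PySem.List.pyRange 0 (d.getD denom 0)).foldl (fun dp _ =>
        (PySem.List.pyRange T (denom - 1) (-1)).foldl (fun dp s =>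
          if pyArrGetD dp (s - denom) false then pyArrSetD dp s true else dp)
          dp) dp) (pyArrSetD (Array.replicate (T + 1).toNat false) 0 true) with hdpA
  have hgetD : ∀ p ∈ d.items, d.getD p.1 0 = p.2 := by
    intro p hp
    exact PySem.Dict.getD_of_mem_items d (by rwa [Prod.mk.eta])
      (by rw [hd]; exact PySem.Dict.nodup_keys_ofList available) 0
  have harr : dpA.toList = dpF := by
    rw [hdpA, hdpF]
    have hinit : (pyArrSetD (Array.replicate (T + 1).toNat false) 0 true).toList = dp0 := by
      rw [pyArrSetD_toList _ _ _ (le_refl 0), Array.toList_replicate, hdp0]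
    rw [← hinit]
    apply foldl_toList
    intro denom hdenom a
    have hkm : denom ∈ d.keys :=
      (PySem.List.sorted_perm d.keys (fun x => x) true).mem_iff.mp hdenom
    obtain ⟨p, hp, hpk⟩ := List.mem_map.mp hkm
    rcases (hitems p hp).2 with hd0' | hq0
    · have hd0 : 0 ≤ denom := hpk ▸ hd0'
      apply foldl_toList
      intro _ _ a2
      apply foldl_toList
      intro s hs a3
      rw [PySem.List.mem_pyRange_neg_one] at hs
      rw [pyArrGetD_toList _ _ _ (by omega)]
      split
      · rw [pyArrSetD_toList _ _ _ (by omega)]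
      · rfl
    · have hq : d.getD denom 0 = 0 := by rw [← hpk, hgetD p hp, hq0]
      rw [hq, PySem.List.pyRange_one_eq_nil (le_refl 0), List.foldl_nil, List.foldl_nil]
  have hfind : (PySem.List.pyRange order_sum (T + 1)).find? (fun s => pyArrGetD dpA s false)
      = (PySem.List.pyRange order_sum (T + 1)).find? (fun s => PySem.List.pyGetD dpF s false) := by
    apply find?_congr'
    intro x hx
    rw [PySem.List.mem_pyRange_one] at hx
    rw [pyArrGetD_toList _ _ _ (by omega), harr]
  rw [hfind]
  have hfold : dpF = L_A.foldl (fun dp p =>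
      (PySem.List.pyRange 0 p.2).foldl (fun dp _ =>
        (PySem.List.pyRange T (p.1 - 1) (-1)).foldl (fun dp s =>
          if PySem.List.pyGetD dp (s - p.1) false then PySem.List.pySetD dp s true else dp)
          dp) dp) dp0 := by
    rw [hdpF, hLA, List.foldl_map]
  have hperm : L_A.Perm d.items := by
    have h1 : (PySem.List.sorted d.keys (fun x => x) true).Perm d.keys :=
      PySem.List.sorted_perm _ _ _
    have h2 : L_A.Perm (d.keys.map (fun k => (k, d.getD k 0))) := by
      rw [hLA]; exact h1.map _
    have h3 : d.keys.map (fun k => (k, d.getD k 0)) = d.items := by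
      show (d.items.map (fun x => x.1)).map (fun k => (k, d.getD k 0)) = d.items
      rw [List.map_map]
      conv_rhs => rw [← List.map_id d.items]
      apply List.map_congr_left
      intro p hp
      have := PySem.Dict.getD_of_mem_items d (k := p.1) (v := p.2)
        (by rwa [Prod.mk.eta]) (by rw [hd]; exact PySem.Dict.nodup_keys_ofList available) 0
      simp only [Function.comp_apply, this, id_eq]
    rwa [h3] at h2
  have hLAprop : ∀ p ∈ L_A, 0 ≤ p.2 ∧ (0 ≤ p.1 ∨ p.2 = 0) :=
    fun p hp => hitems p (hperm.mem_iff.mp hp)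
  have hlenF : dpF.length = (T + 1).toNat := by
    rw [hfold, a_fold_length, hlen0]
  -- A-side characterisation
  have hchar : ∀ i : Int, 0 ≤ i → i ≤ T →
      (PySem.List.pyGetD dpF i false = true ↔ ReachP d.items i) := by
    intro i hi0 hiT
    have h1 : TrueAt dpF i ↔ ∃ t : Int, TrueAt dp0 t ∧ ReachP L_A (i - t) := by
      rw [hfold]
      exact a_fold_trueAt T hT0 L_A hLAprop dp0 hlen0 i hiT
    have h2 : TrueAt dpF i ↔ ReachP d.items i := by
      rw [h1]
      constructor
      · rintro ⟨t, ht, hr⟩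
        rw [hdp0, trueAt_dp0 _ (by omega)] at ht
        rw [ht, sub_zero] at hr
        exact (reachP_perm hperm i).mp hr
      · intro hr
        refine ⟨0, ?_, ?_⟩
        · rw [hdp0, trueAt_dp0 _ (by omega)]
        · rw [sub_zero]
          exact (reachP_perm hperm i).mpr hr
    rw [← h2]
    rw [PySem.List.pyGetD_of_nonneg _ _ hi0]
    constructor
    · intro h; exact ⟨hi0, by omega, h⟩
    · rintro ⟨-, -, h⟩; exact h
  -- B-side characterisation
  have hcharB : ∀ x : Int,
      (x ∈ d.items.foldl (fun sums p =>
        PySem.Set.ofList (sums.flatMap (fun s =>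
          (PySem.List.pyRange 0 (p.2 + 1)).map (fun k => s + p.1 * k))))
        (PySem.Set.ofList [0]) ↔ ReachP d.items x) := by
    intro x
    rw [b_fold_mem]
    constructor
    · rintro ⟨t, ht, hr⟩
      rw [PySem.Set.mem_ofList] at ht
      simp only [List.mem_singleton] at ht
      rwa [ht, sub_zero] at hr
    · intro hr
      refine ⟨0, ?_, by rwa [sub_zero]⟩
      rw [PySem.Set.mem_ofList]
      simp
  set sumsF := d.items.foldl (fun sums p =>
        PySem.Set.ofList (sums.flatMap (fun s =>
          (PySem.List.pyRange 0 (p.2 + 1)).map (fun k => s + p.1 * k))))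
        (PySem.Set.ofList [0]) with hsumsF
  have hcand : ∀ x : Int, x ∈ sumsF.filter (fun s => order_sum ≤ s) ↔
      (ReachP d.items x ∧ order_sum ≤ x) := by
    intro x
    rw [List.mem_filter]
    constructor
    · rintro ⟨hx, hle⟩
      exact ⟨(hcharB x).mp hx, by simpa using hle⟩
    · rintro ⟨hx, hle⟩
      exact ⟨(hcharB x).mpr hx, by simpa using hle⟩
  -- final comparison
  cases hfind : (PySem.List.pyRange order_sum (T + 1)).find?
      (fun s => PySem.List.pyGetD dpF s false) with
  | none =>
    have hnone := find?_pyRange_none (T + 1 - order_sum).toNat order_sum (T + 1) rfl hfind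
    cases hmin : PySem.List.min? (sumsF.filter (fun s => order_sum ≤ s)) (fun s => s) with
    | none => rfl
    | some m =>
      exfalso
      have hm := PySem.List.min?_mem hmin
      obtain ⟨hr, hle⟩ := (hcand m).mp hm
      have hb := reachP_bounds hitems hr
      have h5 := hnone m hle (by omega)
      have h6 := (hchar m hb.1 hb.2).mpr hr
      rw [h6] at h5
      exact absurd h5 (by simp)
  | some s =>
    obtain ⟨hps, hs1, hs2, hleast⟩ := find?_pyRange_some (T + 1 - order_sum).toNat order_sum (T + 1) rfl hfind
    have hrs : ReachP d.items s := (hchar s (by omega) (by omega)).mp hps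
    have hsc : s ∈ sumsF.filter (fun x => order_sum ≤ x) := (hcand s).mpr ⟨hrs, hs1⟩
    cases hmin : PySem.List.min? (sumsF.filter (fun x => order_sum ≤ x)) (fun x => x) with
    | none =>
      exfalso
      rw [PySem.List.min?_eq_none_iff] at hmin
      rw [hmin] at hsc
      simp at hsc
    | some m =>
      have hmmem := PySem.List.min?_mem hmin
      obtain ⟨hrm, hlem⟩ := (hcand m).mp hmmem
      have hbm := reachP_bounds hitems hrm
      have hms : m ≤ s := by simpa using PySem.List.min?_isMin hmin s hsc
      have hpm : PySem.List.pyGetD dpF m false = true := (hchar m hbm.1 hbm.2).mpr hrm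
      have hsm : s ≤ m := by
        by_contra hlt
        have := hleast m hlem (by omega)
        rw [this] at hpm
        exact Bool.false_ne_true hpm
      show s = m
      omega

-- ===== VERDICT (by name: the statement is the Claim_ definition above) =====
theorem select_payment_spec : Claim_equal_select_payment := by
  intro order_sum available _ hpre
  exact main_eq order_sum available hpre.1 hpre.2
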